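-- pv_equiv track=rewrite | github.com/ilSommo/advent-of-code-2017 | day_21.py | break_up
-- ===== SOURCE A (Python) =====
-- import itertools
--
-- def break_up(pattern):
--     """Breaak up pattern in squares."""
--     size = 2 if len(pattern) % 2 == 0 else 3
--     squares = [
--         [["" for _ in range(size)] for _ in range(len(pattern) // size)]
--         for _ in range(len(pattern) // size)
--     ]
--
--     for i, line in enumerate(pattern):
--         for j, char in enumerate(line):
--             squares[i // size][j // size][i % size] += char
--
--     for i, j in itertools.product(range(len(squares)), repeat=2):
--         squares[i][j] = "/".join(squares[i][j])
--
--     return squares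
-- ===== SOURCE B (Python) =====
-- def break_up(pattern):
--     """Breaak up pattern in squares."""
--     size = 2 if len(pattern) % 2 == 0 else 3
--     n = len(pattern) // size
--     return [
--         [
--             "/".join(
--                 "".join(pattern[bi * size + r][bj * size : bj * size + size])
--                 for r in range(size)
--             )
--             for bj in range(n)
--         ]
--         for bi in range(n)
--     ]
-- ===== Notes on version B (the rewrite author's own statement) =====
-- stated objective: simpler
-- what changed: B gathers each square directly, building every block's row by slicing the source row and joining, instead of A's pre-allocating a 3-level nest of empty string buffers and scattering every character of the grid into it one by one before a second product-loop join pass.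
import Mathlib
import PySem

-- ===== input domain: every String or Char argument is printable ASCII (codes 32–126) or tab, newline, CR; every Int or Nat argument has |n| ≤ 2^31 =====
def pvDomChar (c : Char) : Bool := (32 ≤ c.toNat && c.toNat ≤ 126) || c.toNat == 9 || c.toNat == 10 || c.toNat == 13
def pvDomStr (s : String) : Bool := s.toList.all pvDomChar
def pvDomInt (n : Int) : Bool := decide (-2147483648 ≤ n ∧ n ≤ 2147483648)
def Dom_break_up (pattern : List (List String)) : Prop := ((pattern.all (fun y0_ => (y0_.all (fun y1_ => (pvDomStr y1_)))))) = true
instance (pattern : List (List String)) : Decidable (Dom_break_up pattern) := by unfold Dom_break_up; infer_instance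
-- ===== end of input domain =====

-- B gathers each block directly by slicing the source rows and joining, instead of A's
-- scatter of every character into pre-allocated mutable string buffers (objective: simpler).

-- ===== PORT A =====
def break_up (pattern : List (List String)) : List (List String) :=
  let size : Nat := if pattern.length % 2 = 0 then 2 else 3
  let squares0 : List (List (List String)) :=
    (List.range (pattern.length / size)).map (fun _ =>
      (List.range (pattern.length / size)).map (fun _ =>
        (List.range size).map (fun _ => "")))
  let squares :=
    (PySem.List.enumerate pattern).foldl (fun sq il =>
      (PySem.List.enumerate il.2).foldl (fun sq jc =>
        sq.modify (PySem.Int.floordiv il.1 (size : Int)).toNat (fun row =>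
          row.modify (PySem.Int.floordiv jc.1 (size : Int)).toNat (fun cell =>
            cell.modify (PySem.Int.mod il.1 (size : Int)).toNat (fun st => st ++ jc.2)))) sq) squares0
  -- Python's final in-place `squares[i][j] = "/".join(squares[i][j])` over product(range, repeat=2)
  -- replaces every entry by its join; on the immutable Lean side this is the elementwise map.
  squares.map (fun row => row.map (fun cell => PySem.Str.join "/" cell))

-- ===== PORT B =====
def break_up_alt (pattern : List (List String)) : List (List String) :=
  let size : Nat := if pattern.length % 2 = 0 then 2 else 3
  let n : Nat := pattern.length / size
  (List.range n).map (fun bi =>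
    (List.range n).map (fun bj =>
      PySem.Str.join "/" ((List.range size).map (fun r =>
        -- pattern[bi*size+r] is always in range in B; ported with getD
        PySem.Str.join "" (PySem.List.slice (pattern.getD (bi * size + r) [])
          (some ((bj * size : Nat) : Int)) (some ((bj * size + size : Nat) : Int)))))))

-- ===== PRECONDITION & SPEC =====
def pvSizeBU (pattern : List (List String)) : Nat := if pattern.length % 2 = 0 then 2 else 3
def pvMBU (pattern : List (List String)) : Nat := (pattern.length / pvSizeBU pattern) * pvSizeBU pattern
-- Pre_ holds exactly when Python A returns (otherwise its indexing `squares[i//size][j//size]`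
-- raises IndexError): every nonempty row must lie at index < (len//size)*size and be at most that wide.
def Pre_break_up (pattern : List (List String)) : Prop :=
  ∀ k < pattern.length, pattern.getD k [] ≠ [] →
    k < pvMBU pattern ∧ (pattern.getD k []).length ≤ pvMBU pattern
instance (pattern : List (List String)) : Decidable (Pre_break_up pattern) := by
  unfold Pre_break_up; infer_instance
def pvWitness_break_up : List (List String) := [["a", "b"], ["c", "d"]]
def Spec_break_up (pattern : List (List String)) (out : List (List String)) : Prop := out = break_up_alt pattern
instance (pattern : List (List String)) (out : List (List String)) : Decidable (Spec_break_up pattern out) := by unfold Spec_break_up; infer_instance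

-- ===== CLAIM (what is proved, stated in full; the proofs are below) =====
def Claim_equal_break_up : Prop := ∀ (pattern : List (List String)), Dom_break_up pattern → Pre_break_up pattern → Spec_break_up pattern (break_up pattern)

-- ===== LEMMAS AND PROOFS =====

/-- The n × n × s nest of strings given by a coordinate function. -/
def pvMk3 (n s : Nat) (φ : Nat → Nat → Nat → String) : List (List (List String)) :=
  (List.range n).map fun I => (List.range n).map fun J => (List.range s).map fun K => φ I J K

/-- The characters row `line` (whose first element has column index `j0`) contributes
to block column `J`: the concatenation of its elements at columns `j` with `j / s = J`. -/
def pvChunk (s J : Nat) : List String → Nat → String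
  | [], _ => ""
  | c :: cs, j0 => (if j0 / s = J then c else "") ++ pvChunk s J cs (j0 + 1)

theorem pvModify_map_range {α : Type} (n p : Nat) (f : Nat → α) (g : α → α) :
    ((List.range n).map f).modify p g
      = (List.range n).map (fun x => if x = p then g (f x) else f x) := by
  apply List.ext_getElem
  · simp
  · intro k h1 h2
    simp only [List.length_modify, List.length_map, List.length_range] at h1
    simp only [List.getElem_modify, List.getElem_map, List.getElem_range]
    rcases eq_or_ne k p with h | h
    · simp [h]
    · simp [h, Ne.symm h]

theorem pvMk3_congr (n s : Nat) (φ ψ : Nat → Nat → Nat → String)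
    (h : ∀ I < n, ∀ J < n, ∀ K < s, φ I J K = ψ I J K) :
    pvMk3 n s φ = pvMk3 n s ψ := by
  unfold pvMk3
  refine List.map_congr_left (fun I hI => ?_)
  refine List.map_congr_left (fun J hJ => ?_)
  refine List.map_congr_left (fun K hK => ?_)
  exact h I (List.mem_range.mp hI) J (List.mem_range.mp hJ) K (List.mem_range.mp hK)

theorem pvApp_mk3 (n s : Nat) (φ : Nat → Nat → Nat → String) (i j : Nat) (c : String) :
    (pvMk3 n s φ).modify (i / s) (fun row =>
      row.modify (j / s) (fun cell => cell.modify (i % s) (fun st => st ++ c)))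
      = pvMk3 n s (fun I J K =>
          if I = i / s ∧ J = j / s ∧ K = i % s then φ I J K ++ c else φ I J K) := by
  unfold pvMk3
  rw [pvModify_map_range]
  refine List.map_congr_left (fun I hI => ?_)
  by_cases h1 : I = i / s
  · subst h1
    rw [if_pos rfl, pvModify_map_range]
    refine List.map_congr_left (fun J hJ => ?_)
    by_cases h2 : J = j / s
    · subst h2
      simp only [if_pos rfl]
      rw [pvModify_map_range]
      refine List.map_congr_left (fun K hK => ?_)
      by_cases h3 : K = i % s
      · simp [h3]
      · simp [h3]
    · simp [h2]
  · simp [h1]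

theorem pvInner_fold (s n : Nat) (hs : 0 < s) (i : Nat) (hi : i / s < n)
    (line : List String) : ∀ (j0 : Nat) (φ : Nat → Nat → Nat → String),
    j0 + line.length ≤ n * s →
    ((PySem.List.enumerate line (j0 : Int)).foldl (fun sq jc =>
        sq.modify (PySem.Int.floordiv ((i : Nat) : Int) (s : Int)).toNat (fun row =>
          row.modify (PySem.Int.floordiv jc.1 (s : Int)).toNat (fun cell =>
            cell.modify (PySem.Int.mod ((i : Nat) : Int) (s : Int)).toNat (fun st => st ++ jc.2))))
      (pvMk3 n s φ))
      = pvMk3 n s (fun I J K =>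
          if I = i / s ∧ K = i % s then φ I J K ++ pvChunk s J line j0 else φ I J K) := by
  induction line with
  | nil =>
    intro j0 φ _
    rw [PySem.List.enumerate_nil]
    simp only [List.foldl_nil]
    refine (pvMk3_congr n s _ _ (fun I _ J _ K _ => ?_)).symm
    by_cases h : I = i / s ∧ K = i % s
    · simp [h, pvChunk]
    · simp [h]
  | cons c cs ih =>
    intro j0 φ hlen
    rw [PySem.List.enumerate_cons]
    simp only [List.foldl_cons]
    have hcast : ((j0 : Int) + 1) = ((j0 + 1 : Nat) : Int) := by push_cast; ring
    have hstep :
        (pvMk3 n s φ).modify (PySem.Int.floordiv ((i : Nat) : Int) (s : Int)).toNat (fun row =>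
          row.modify (PySem.Int.floordiv ((j0 : Nat) : Int) (s : Int)).toNat (fun cell =>
            cell.modify (PySem.Int.mod ((i : Nat) : Int) (s : Int)).toNat (fun st => st ++ c)))
          = pvMk3 n s (fun I J K =>
              if I = i / s ∧ J = j0 / s ∧ K = i % s then φ I J K ++ c else φ I J K) := by
      simpa using pvApp_mk3 n s φ i j0 c
    rw [hcast, hstep, ih (j0 + 1) _ (by simp at hlen ⊢; omega)]
    refine pvMk3_congr n s _ _ (fun I hI J hJ K hK => ?_)
    by_cases h : I = i / s ∧ K = i % s
    · by_cases h2 : J = j0 / s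
      · simp [pvChunk, h, h2, String.append_assoc]
      · simp [pvChunk, h, h2, Ne.symm h2]
    · have h' : ¬ (I = i / s ∧ J = j0 / s ∧ K = i % s) := by tauto
      simp [h, h']

theorem pvOuter_fold (s n : Nat) (hs : 0 < s) :
    ∀ (rows : List (List String)) (t0 : Nat) (φ : Nat → Nat → Nat → String),
    (∀ k < rows.length, rows.getD k [] ≠ [] →
        t0 + k < n * s ∧ (rows.getD k []).length ≤ n * s) →
    ((PySem.List.enumerate rows (t0 : Int)).foldl (fun sq il =>
        (PySem.List.enumerate il.2).foldl (fun sq jc =>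
          sq.modify (PySem.Int.floordiv il.1 (s : Int)).toNat (fun row =>
            row.modify (PySem.Int.floordiv jc.1 (s : Int)).toNat (fun cell =>
              cell.modify (PySem.Int.mod il.1 (s : Int)).toNat (fun st => st ++ jc.2)))) sq)
      (pvMk3 n s φ))
      = pvMk3 n s (fun I J K =>
          φ I J K ++ (if t0 ≤ I * s + K then pvChunk s J (rows.getD (I * s + K - t0) []) 0 else "")) := by
  intro rows
  induction rows with
  | nil =>
    intro t0 φ _
    rw [PySem.List.enumerate_nil]
    simp only [List.foldl_nil]
    refine (pvMk3_congr n s _ _ (fun I _ J _ K _ => ?_)).symm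
    by_cases h : t0 ≤ I * s + K
    · simp [h, List.getD, pvChunk]
    · simp [h]
  | cons line rest ih =>
    intro t0 φ hrows
    rw [PySem.List.enumerate_cons]
    simp only [List.foldl_cons]
    have hstep :
        (PySem.List.enumerate line).foldl (fun sq jc =>
          sq.modify (PySem.Int.floordiv ((t0 : Nat) : Int) (s : Int)).toNat (fun row =>
            row.modify (PySem.Int.floordiv jc.1 (s : Int)).toNat (fun cell =>
              cell.modify (PySem.Int.mod ((t0 : Nat) : Int) (s : Int)).toNat (fun st => st ++ jc.2))))
          (pvMk3 n s φ)
          = pvMk3 n s (fun I J K =>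
              if I = t0 / s ∧ K = t0 % s then φ I J K ++ pvChunk s J line 0 else φ I J K) := by
      rcases eq_or_ne line [] with hline | hline
      · subst hline
        rw [PySem.List.enumerate_nil]
        simp only [List.foldl_nil]
        refine pvMk3_congr n s _ _ (fun I _ J _ K _ => ?_)
        by_cases h : I = t0 / s ∧ K = t0 % s
        · simp [h, pvChunk]
        · simp [h]
      · have h0 := hrows 0 (by simp) (by simpa using hline)
        simp only [List.getD_cons_zero] at h0
        have hi : t0 / s < n := (Nat.div_lt_iff_lt_mul hs).mpr (by omega)
        simpa using pvInner_fold s n hs t0 hi line 0 φ (by omega)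
    have hcast : ((t0 : Int) + 1) = ((t0 + 1 : Nat) : Int) := by push_cast; ring
    rw [hstep, hcast, ih (t0 + 1) _ ?side]
    case side =>
      intro k hk hne
      have h := hrows (k + 1) (by simp; omega) (by simpa using hne)
      simp only [List.getD_cons_succ] at h
      exact ⟨by omega, h.2⟩
    refine pvMk3_congr n s _ _ (fun I hI J hJ K hK => ?_)
    have e1 : I * s + K = s * I + K := by ring
    have hd : (I * s + K) / s = I := by
      rw [e1, Nat.mul_add_div hs, Nat.div_eq_of_lt hK]
      omega
    have hm : (I * s + K) % s = K := by
      rw [e1, Nat.mul_add_mod, Nat.mod_eq_of_lt hK]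
    have hiff : (I = t0 / s ∧ K = t0 % s) ↔ I * s + K = t0 := by
      constructor
      · rintro ⟨rfl, rfl⟩
        have := Nat.div_add_mod t0 s
        omega
      · intro h
        constructor
        · rw [← h, hd]
        · rw [← h, hm]
    rcases lt_trichotomy (I * s + K) t0 with hc | hc | hc
    · have h1 : ¬ (I = t0 / s ∧ K = t0 % s) := by rw [hiff]; omega
      simp [h1, show ¬ t0 + 1 ≤ I * s + K by omega, show ¬ t0 ≤ I * s + K by omega]
    · obtain ⟨rfl, rfl⟩ := hiff.mpr hc
      have he : t0 / s * s + t0 % s = t0 := Nat.div_add_mod' t0 s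
      rw [if_pos ⟨rfl, rfl⟩, he]
      rw [if_neg (by omega), if_pos (le_refl t0), Nat.sub_self]
      simp [String.append_empty]
    · have h1 : ¬ (I = t0 / s ∧ K = t0 % s) := by rw [hiff]; omega
      have h2 : I * s + K - t0 = (I * s + K - (t0 + 1)) + 1 := by omega
      simp [h1, h2, show t0 + 1 ≤ I * s + K by omega, show t0 ≤ I * s + K by omega]

theorem pvCharsJoinNil (parts : List (List Char)) :
    PySem.Chars.join [] parts = parts.flatten := by
  induction parts with
  | nil => simp [PySem.Chars.join_nil]
  | cons a rest ih =>
    cases rest with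
    | nil => simp [PySem.Chars.join_singleton]
    | cons b r =>
      rw [PySem.Chars.join_cons_cons]
      simp [ih]

theorem pvChunk_toList (s J : Nat) (hs : 0 < s) (line : List String) :
    ∀ j0 : Nat, (pvChunk s J line j0).toList
      = (((line.drop (J * s - j0)).take (min s (J * s + s - j0))).map String.toList).flatten := by
  induction line with
  | nil => intro j0; simp [pvChunk]
  | cons c cs ih =>
    intro j0
    simp only [pvChunk, String.toList_append]
    rcases lt_or_ge j0 (J * s) with h1 | h1
    · -- before the window: the head is not selected
      have hdiv : j0 / s ≠ J := by
        have : j0 / s < J := (Nat.div_lt_iff_lt_mul hs).mpr h1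
        omega
      obtain ⟨k, hk⟩ : ∃ k, J * s - j0 = k + 1 := ⟨J * s - j0 - 1, by omega⟩
      have hk' : J * s - (j0 + 1) = k := by omega
      have hmin : min s (J * s + s - j0) = s := by omega
      have hmin' : min s (J * s + s - (j0 + 1)) = s := by omega
      rw [ih (j0 + 1)]
      simp [hdiv, hk, hk', hmin, hmin']
    · -- at or past the start of the window
      rcases lt_or_ge j0 (J * s + s) with h2 | h2
      · -- inside the window
        have hdiv : j0 / s = J := Nat.div_eq_of_lt_le (by omega) (by rw [Nat.succ_mul]; omega)
        have hJ0 : J * s - j0 = 0 := by omega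
        have hJ1 : J * s - (j0 + 1) = 0 := by omega
        obtain ⟨m, hm⟩ : ∃ m, J * s + s - j0 = m + 1 := ⟨J * s + s - j0 - 1, by omega⟩
        have hmin : min s (J * s + s - j0) = m + 1 := by omega
        have hmin' : min s (J * s + s - (j0 + 1)) = m := by omega
        rw [ih (j0 + 1)]
        simp [hdiv, hJ0, hJ1, hmin, hmin']
      · -- past the window: nothing selected any more
        have hdiv : j0 / s ≠ J := by
          have : J + 1 ≤ j0 / s := (Nat.le_div_iff_mul_le hs).mpr (by rw [Nat.add_mul]; omega)
          omega
        have hmin : min s (J * s + s - j0) = 0 := by omega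
        have hmin' : min s (J * s + s - (j0 + 1)) = 0 := by omega
        rw [ih (j0 + 1)]
        simp [hdiv, hmin, hmin']

theorem pvChunk_eq_join (s J : Nat) (hs : 0 < s) (line : List String) :
    pvChunk s J line 0 = PySem.Str.join "" ((line.drop (J * s)).take s) := by
  apply String.toList_inj.mp
  rw [pvChunk_toList s J hs line 0, PySem.Str.toList_join]
  have he : "".toList = ([] : List Char) := rfl
  rw [he, pvCharsJoinNil]
  have h1 : J * s - 0 = J * s := by omega
  have h2 : min s (J * s + s - 0) = s := by omega
  rw [h1, h2]

-- ===== VERDICT (by name: the statement is the Claim_ definition above) =====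
set_option maxHeartbeats 1000000 in
theorem break_up_spec : Claim_equal_break_up := by
  unfold Claim_equal_break_up
  intro pattern _ hpre
  unfold Spec_break_up
  simp only [break_up, break_up_alt]
  set s : Nat := (if pattern.length % 2 = 0 then 2 else 3) with hs_def
  set n : Nat := pattern.length / s with hn_def
  have hs : 0 < s := by rw [hs_def]; split <;> norm_num
  have hrows : ∀ k < pattern.length, pattern.getD k [] ≠ [] →
      0 + k < n * s ∧ (pattern.getD k []).length ≤ n * s := by
    intro k hk hne
    have h := hpre k hk hne
    unfold pvMBU pvSizeBU at h
    rw [← hs_def, ← hn_def] at h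
    exact ⟨by omega, h.2⟩
  have houter := pvOuter_fold s n hs pattern 0 (fun _ _ _ => "") hrows
  have hstart : ((0 : Nat) : Int) = (0 : Int) := rfl
  rw [hstart] at houter
  rw [show ((List.range n).map (fun _ =>
        (List.range n).map (fun _ => (List.range s).map fun _ => ("" : String))))
      = pvMk3 n s (fun _ _ _ => "") from rfl, houter]
  unfold pvMk3
  simp only [List.map_map, Function.comp_def]
  refine List.map_congr_left (fun I hI => ?_)
  refine List.map_congr_left (fun J hJ => ?_)
  congr 1
  refine List.map_congr_left (fun K hK => ?_)
  have h0 : (0 : Nat) ≤ I * s + K := Nat.zero_le _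
  rw [if_pos h0, Nat.sub_zero, String.empty_append]
  rw [PySem.List.slice_natCast]
  have hsub : J * s + s - J * s = s := by omega
  rw [hsub]
  exact pvChunk_eq_join s J hs (pattern.getD (I * s + K) [])
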